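-- pv_equiv track=rewrite | github.com/jamestic-airport/psm.tsv_processor | psm_processor.py | clean_localised_sites
-- ===== SOURCE A (Python) =====
-- def clean_localised_sites(localised_sites, ptm):
--     clean_sites = []
--     for num, char in localised_sites:
--         if num == 2:
--             return 'N-terminal'
--         if ptm == 'methyl':
--             if char in ['r', 'k']:
--                 clean_sites.append(char.upper() + str(num))
--         if ptm == 'phospho':
--             if char in ['s', 't', 'y']:
--                 clean_sites.append(char.upper() + str(num))
--         if ptm == 'acetyl':
--             if char in ['r', 'k', 's', 't', 'y']:
--                 clean_sites.append(char.upper() + str(num))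
--     delimiter = ', '
--     clean_sites = delimiter.join(clean_sites)
--     if len(clean_sites) == 0:
--         return 'NONE'
--     return clean_sites
-- ===== SOURCE B (Python) =====
-- def clean_localised_sites(localised_sites, ptm):
--     items = list(localised_sites)
--     if any(num == 2 for num, char in items):
--         return 'N-terminal'
--     allowed = {'methyl': ('r', 'k'),
--                'phospho': ('s', 't', 'y'),
--                'acetyl': ('r', 'k', 's', 't', 'y')}.get(ptm, ())
--     sites = [char.upper() + str(num) for num, char in items if char in allowed]
--     return ', '.join(sites) or 'NONE'
-- ===== Notes on version B (the rewrite author's own statement) =====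
-- stated objective: simpler
-- what changed: Replaces A's single interleaved loop (early-return guard plus three per-ptm if-chains inside one accumulator loop) by a detection pass (any num == 2) followed by a table-driven allowed-character lookup and one list comprehension joined at the end.
import Mathlib
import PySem

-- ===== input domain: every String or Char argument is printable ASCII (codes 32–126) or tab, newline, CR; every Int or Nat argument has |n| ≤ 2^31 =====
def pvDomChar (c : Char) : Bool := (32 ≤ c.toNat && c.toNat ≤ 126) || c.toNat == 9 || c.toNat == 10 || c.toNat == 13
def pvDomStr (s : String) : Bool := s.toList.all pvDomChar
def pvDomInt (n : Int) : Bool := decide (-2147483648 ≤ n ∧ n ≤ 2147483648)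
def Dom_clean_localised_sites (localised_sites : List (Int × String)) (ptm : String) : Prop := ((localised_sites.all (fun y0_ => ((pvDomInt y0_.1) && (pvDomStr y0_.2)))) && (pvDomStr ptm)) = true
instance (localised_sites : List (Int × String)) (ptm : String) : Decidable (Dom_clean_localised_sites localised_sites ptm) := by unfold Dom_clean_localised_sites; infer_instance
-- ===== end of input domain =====

-- B replaces A's single interleaved loop (early return + three per-ptm if chains) by a
-- detection pass plus a table-driven filter/map comprehension; same behaviour, simpler.

-- ===== PORT A =====
-- the for-loop of A: early 'return N-terminal' modelled as none, the accumulator as acc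
def cls_loopA (ptm : String) : List (Int × String) → List String → Option (List String)
  | [], acc => some acc
  | (num, char) :: rest, acc =>
    if num = 2 then none
    else
      let acc1 := if ptm = "methyl" then
          (if char ∈ (["r", "k"] : List String) then acc ++ [PySem.Str.upper char ++ PySem.Int.toStr num] else acc)
        else acc
      let acc2 := if ptm = "phospho" then
          (if char ∈ (["s", "t", "y"] : List String) then acc1 ++ [PySem.Str.upper char ++ PySem.Int.toStr num] else acc1)
        else acc1
      let acc3 := if ptm = "acetyl" then
          (if char ∈ (["r", "k", "s", "t", "y"] : List String) then acc2 ++ [PySem.Str.upper char ++ PySem.Int.toStr num] else acc2)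
        else acc2
      cls_loopA ptm rest acc3

def clean_localised_sites (localised_sites : List (Int × String)) (ptm : String) : String :=
  match cls_loopA ptm localised_sites [] with
  | none => "N-terminal"
  | some clean_sites =>
    let joined := PySem.Str.join ", " clean_sites
    if PySem.Str.len joined = 0 then "NONE" else joined

-- ===== PORT B =====
-- the dict lookup {'methyl': …}.get(ptm, ())
def cls_allowed (ptm : String) : List String :=
  if ptm = "methyl" then ["r", "k"]
  else if ptm = "phospho" then ["s", "t", "y"]
  else if ptm = "acetyl" then ["r", "k", "s", "t", "y"]
  else []

def clean_localised_sites_alt (localised_sites : List (Int × String)) (ptm : String) : String :=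
  if localised_sites.any (fun p => p.1 == 2) then "N-terminal"
  else
    let allowed := cls_allowed ptm
    let sites := (localised_sites.filter (fun p => decide (p.2 ∈ allowed))).map
      (fun p => PySem.Str.upper p.2 ++ PySem.Int.toStr p.1)
    let s := PySem.Str.join ", " sites
    if s = "" then "NONE" else s

-- ===== PRECONDITION & SPEC =====
def Spec_clean_localised_sites (localised_sites : List (Int × String)) (ptm : String) (out : String) : Prop := out = clean_localised_sites_alt localised_sites ptm
instance (localised_sites : List (Int × String)) (ptm : String) (out : String) : Decidable (Spec_clean_localised_sites localised_sites ptm out) := by unfold Spec_clean_localised_sites; infer_instance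

-- ===== CLAIM (what is proved, stated in full; the proofs are below) =====
def Claim_equal_clean_localised_sites : Prop := ∀ (localised_sites : List (Int × String)) (ptm : String), Dom_clean_localised_sites localised_sites ptm → Spec_clean_localised_sites localised_sites ptm (clean_localised_sites localised_sites ptm)

-- ===== LEMMAS AND PROOFS =====

theorem cls_loopA_none (ptm : String) (l : List (Int × String))
    (h : l.any (fun p => p.1 == 2) = true) (acc : List String) :
    cls_loopA ptm l acc = none := by
  induction l generalizing acc with
  | nil => simp at h
  | cons hd tl ih =>
    obtain ⟨num, char⟩ := hd
    by_cases h2 : num = 2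
    · simp [cls_loopA, h2]
    · simp only [List.any_cons, Bool.or_eq_true, beq_iff_eq] at h
      rcases h with h | h
      · exact absurd h h2
      · simp only [cls_loopA, if_neg h2]
        exact ih h _

theorem cls_loopA_some (ptm : String) (l : List (Int × String))
    (h : l.any (fun p => p.1 == 2) = false) (acc : List String) :
    cls_loopA ptm l acc =
      some (acc ++ (l.filter (fun p => decide (p.2 ∈ cls_allowed ptm))).map
        (fun p => PySem.Str.upper p.2 ++ PySem.Int.toStr p.1)) := by
  induction l generalizing acc with
  | nil => simp [cls_loopA]
  | cons hd tl ih =>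
    obtain ⟨num, char⟩ := hd
    simp only [List.any_cons, Bool.or_eq_false_iff, beq_eq_false_iff_ne, ne_eq] at h
    obtain ⟨h2, htl⟩ := h
    simp only [cls_loopA, if_neg h2]
    rw [ih htl]
    by_cases hm : ptm = "methyl"
    · subst hm
      simp only [cls_allowed, List.filter_cons]
      norm_num
      split_ifs <;> simp_all
    · by_cases hp : ptm = "phospho"
      · subst hp
        simp only [cls_allowed, List.filter_cons]
        norm_num
        split_ifs <;> simp_all
      · by_cases ha : ptm = "acetyl"
        · subst ha
          simp only [cls_allowed, List.filter_cons]
          norm_num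
          split_ifs <;> simp_all
        · simp [cls_allowed, hm, hp, ha]

theorem len_eq_zero_iff (s : String) : (PySem.Str.len s = 0) ↔ s = "" := by
  rw [PySem.Str.len_eq]
  constructor
  · intro h
    have h' : s.toList.length = 0 := by exact_mod_cast h
    have : s.toList = [] := List.eq_nil_of_length_eq_zero h'
    cases s; simp_all [String.toList]
  · intro h; subst h; rfl

-- ===== VERDICT (by name: the statement is the Claim_ definition above) =====
theorem clean_localised_sites_spec : Claim_equal_clean_localised_sites := by
  intro l ptm _
  unfold Spec_clean_localised_sites clean_localised_sites clean_localised_sites_alt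
  by_cases h : l.any (fun p => p.1 == 2) = true
  · rw [cls_loopA_none ptm l h, if_pos h]
  · rw [Bool.not_eq_true] at h
    rw [cls_loopA_some ptm l h, if_neg (by simp [h])]
    simp only [List.nil_append]
    rcases eq_or_ne (PySem.Str.len (PySem.Str.join ", "
      ((l.filter (fun p => decide (p.2 ∈ cls_allowed ptm))).map
        (fun p => PySem.Str.upper p.2 ++ PySem.Int.toStr p.1)))) 0 with hz | hz
    · rw [if_pos hz, if_pos ((len_eq_zero_iff _).mp hz)]
    · rw [if_neg hz, if_neg (fun he => hz ((len_eq_zero_iff _).mpr he))]
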